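-- pv_equiv track=rewrite | github.com/bornToBeRoot17/trex | preprocessing.py | unscramble_tm
-- ===== SOURCE A (Python) =====
-- import copy
--
-- def unscramble_tm(TM):
--     TM2=copy.deepcopy(TM)
--     for line in range(len(TM)):
--         max = 0
--         max_pos = -1;
--
--         for col in range(line+1, len(TM)):
--             if TM2[line][col] > max:
--                 max=TM2[line][col]
--                 max_pos=col
--
--         if max_pos > 0:
--             #print "  -> swapping "+str(line+1)+"<->"+str(max_pos)+" (max="+str(max)+")"
--             for i in range(len(TM)): #swapping column
--                 aux=TM2[i][line+1]
--                 TM2[i][line+1]=TM2[i][max_pos]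
--                 TM2[i][max_pos]=aux
--
--             for i in range(len(TM)): #swapping line
--                 aux=TM2[line+1][i]
--                 TM2[line+1][i]=TM2[max_pos][i]
--                 TM2[max_pos][i]=aux
--
--     return TM2
-- ===== SOURCE B (Python) =====
-- def unscramble_tm(TM):
--     n = len(TM)
--     p = list(range(n))
--     for line in range(n):
--         mx = 0
--         mp = -1
--         for col in range(line + 1, n):
--             v = TM[p[line]][p[col]]
--             if v > mx:
--                 mx = v
--                 mp = col
--         if mp > 0:
--             p[line + 1], p[mp] = p[mp], p[line + 1]
--     return [[TM[p[i]][p[j]] for j in range(n)] for i in range(n)]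
-- ===== Notes on version B (the rewrite author's own statement) =====
-- stated objective: alternative
-- what changed: B replaces A's deep copy with repeated physical column+row swaps of the matrix by a single index permutation that gets its entries swapped, followed by one final gather pass TM2[i][j]=TM[p[i]][p[j]].
-- outside the precondition, e.g. on unscramble_tm([[0, 1, 5], [7, 0, 9]]): A returns [[0, 1, 5], [7, 0, 9]], B returns [[0, 1], [7, 0]]
import Mathlib
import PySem

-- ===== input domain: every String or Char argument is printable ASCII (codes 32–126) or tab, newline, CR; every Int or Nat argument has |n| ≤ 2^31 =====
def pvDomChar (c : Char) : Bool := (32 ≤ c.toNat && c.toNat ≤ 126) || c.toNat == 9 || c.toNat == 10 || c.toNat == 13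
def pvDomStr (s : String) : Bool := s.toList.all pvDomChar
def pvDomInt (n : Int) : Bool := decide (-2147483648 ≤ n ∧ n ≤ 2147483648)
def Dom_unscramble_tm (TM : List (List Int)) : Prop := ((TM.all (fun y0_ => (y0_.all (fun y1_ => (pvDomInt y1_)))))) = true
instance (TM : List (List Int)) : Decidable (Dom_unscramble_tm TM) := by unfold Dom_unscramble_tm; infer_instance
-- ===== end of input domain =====

-- B replaces A's deep-copy + physical row/column swapping by an index permutation that is
-- swapped instead, with one final gather pass (objective: alternative decomposition; return
-- value only — A mutates nothing observable, its copy is internal).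


-- ===== PORT A =====
-- total indexing helper: M[i][j]; all accesses are in range under Pre_ (square matrix)
def getI (M : List (List Int)) (i j : Nat) : Int := (M.getD i []).getD j 0

-- one iteration of A's column-swapping loop (aux=TM2[i][c1]; TM2[i][c1]=TM2[i][c2]; TM2[i][c2]=aux)
def csStep (c1 c2 : Nat) (M : List (List Int)) (i : Nat) : List (List Int) :=
  let a := getI M i c1
  let b := getI M i c2
  let M1 := M.set i ((M.getD i []).set c1 b)
  M1.set i ((M1.getD i []).set c2 a)

-- one iteration of A's line-swapping loop
def rsStep (r1 r2 : Nat) (M : List (List Int)) (i : Nat) : List (List Int) :=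
  let a := getI M r1 i
  let b := getI M r2 i
  let M1 := M.set r1 ((M.getD r1 []).set i b)
  M1.set r2 ((M1.getD r2 []).set i a)

def colSwap (M : List (List Int)) (n c1 c2 : Nat) : List (List Int) :=
  (List.range n).foldl (csStep c1 c2) M

def rowSwap (M : List (List Int)) (n r1 r2 : Nat) : List (List Int) :=
  (List.range n).foldl (rsStep r1 r2) M

-- A's inner max loop: state (max, max_pos), max=0, max_pos=-1, strict >
def maxScanA (M : List (List Int)) (line n : Nat) : Int × Int :=
  (List.range' (line+1) (n - (line+1))).foldl
    (fun (s : Int × Int) col =>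
      if getI M line col > s.1 then (getI M line col, (col : Int)) else s) (0, -1)

-- one iteration of A's outer loop
def stepA (n : Nat) (M : List (List Int)) (line : Nat) : List (List Int) :=
  let s := maxScanA M line n
  if s.2 > 0 then rowSwap (colSwap M n (line+1) s.2.toNat) n (line+1) s.2.toNat else M

def unscramble_tm (TM : List (List Int)) : List (List Int) :=
  (List.range TM.length).foldl (stepA TM.length) TM

-- ===== PORT B =====
def pG (p : List Nat) (i : Nat) : Nat := p.getD i 0

-- B's inner max loop, reading TM through the permutation p
def maxScanB (TM : List (List Int)) (p : List Nat) (line n : Nat) : Int × Int :=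
  (List.range' (line+1) (n - (line+1))).foldl
    (fun (s : Int × Int) col =>
      if getI TM (pG p line) (pG p col) > s.1 then (getI TM (pG p line) (pG p col), (col : Int)) else s)
    (0, -1)

-- one iteration of B's loop: swap only the two permutation entries
def stepB (TM : List (List Int)) (n : Nat) (p : List Nat) (line : Nat) : List Nat :=
  let s := maxScanB TM p line n
  if s.2 > 0 then (p.set (line+1) (pG p s.2.toNat)).set s.2.toNat (pG p (line+1)) else p

-- B's final gather pass: out[i][j] = TM[p[i]][p[j]]
def gather (TM : List (List Int)) (n : Nat) (p : List Nat) : List (List Int) :=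
  (List.range n).map (fun i => (List.range n).map (fun j => getI TM (pG p i) (pG p j)))

def unscramble_tm_alt (TM : List (List Int)) : List (List Int) :=
  gather TM TM.length ((List.range TM.length).foldl (stepB TM TM.length) (List.range TM.length))

-- ===== PRECONDITION & SPEC =====
-- Pre_ excludes non-square matrices: on rows shorter than len(TM) A raises IndexError, and on
-- rows longer than len(TM) A's partial row swap (only the first len(TM) entries) is an accident
-- of its element-wise loop that no caller of a transition-matrix routine relies on.
def Pre_unscramble_tm (TM : List (List Int)) : Prop := ∀ r ∈ TM, r.length = TM.length
instance (TM : List (List Int)) : Decidable (Pre_unscramble_tm TM) := by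
  unfold Pre_unscramble_tm; infer_instance
def pvWitness_unscramble_tm : List (List Int) := [[0, 2], [3, 0]]

def Spec_unscramble_tm (TM : List (List Int)) (out : List (List Int)) : Prop := out = unscramble_tm_alt TM
instance (TM : List (List Int)) (out : List (List Int)) : Decidable (Spec_unscramble_tm TM out) := by unfold Spec_unscramble_tm; infer_instance

-- ===== CLAIM (what is proved, stated in full; the proofs are below) =====
def Claim_equal_unscramble_tm : Prop := ∀ (TM : List (List Int)), Dom_unscramble_tm TM → Pre_unscramble_tm TM → Spec_unscramble_tm TM (unscramble_tm TM)

-- ===== LEMMAS AND PROOFS =====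

-- the row transformation a column swap performs
def sw (c1 c2 : Nat) (r : List Int) : List Int :=
  (r.set c1 (r.getD c2 0)).set c2 (r.getD c1 0)

-- partially swapped row: first k entries from r, the rest from s
def mix (r s : List Int) (k : Nat) : List Int := r.take k ++ s.drop k

-- generic: entry i of "l with entries c1 and c2 swapped"
theorem swap_getD {α : Type} (l : List α) (d : α) (c1 c2 i : Nat)
    (h1 : c1 < l.length) (h2 : c2 < l.length) (hi : i < l.length) :
    ((l.set c1 (l.getD c2 d)).set c2 (l.getD c1 d)).getD i d
      = l.getD (if i = c2 then c1 else if i = c1 then c2 else i) d := by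
  have hi' : i < ((l.set c1 (l.getD c2 d)).set c2 (l.getD c1 d)).length := by simpa using hi
  rw [List.getD_eq_getElem _ _ hi']
  by_cases e2 : i = c2
  · subst e2
    rw [List.getElem_set_self, if_pos rfl, List.getD_eq_getElem _ _ h1]
  · rw [List.getElem_set_ne (by omega)]
    by_cases e1 : i = c1
    · subst e1
      rw [List.getElem_set_self, if_neg e2, if_pos rfl]
    · rw [List.getElem_set_ne (by omega), if_neg e2, if_neg e1, List.getD_eq_getElem _ _ hi]

theorem gather_length (TM : List (List Int)) (n : Nat) (p : List Nat) :
    (gather TM n p).length = n := by simp [gather]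

theorem gather_getD (TM : List (List Int)) (n : Nat) (p : List Nat) (i : Nat) (hi : i < n) :
    (gather TM n p).getD i [] = (List.range n).map (fun j => getI TM (pG p i) (pG p j)) := by
  have hi' : i < (gather TM n p).length := by simpa [gather] using hi
  rw [List.getD_eq_getElem _ _ hi']
  simp [gather]

theorem gather_entry (TM : List (List Int)) (n : Nat) (p : List Nat) (i j : Nat)
    (hi : i < n) (hj : j < n) :
    getI (gather TM n p) i j = getI TM (pG p i) (pG p j) := by
  show ((gather TM n p).getD i []).getD j 0 = _
  rw [gather_getD TM n p i hi, List.getD_eq_getElem _ _ (by simpa using hj),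
    List.getElem_map, List.getElem_range]

theorem csStep_eq (c1 c2 : Nat) (M : List (List Int)) (k : Nat) (hk : k < M.length) :
    csStep c1 c2 M k = M.set k (sw c1 c2 (M.getD k [])) := by
  unfold csStep sw getI
  have h1 : (M.set k ((M.getD k []).set c1 ((M.getD k []).getD c2 0))).getD k []
      = (M.getD k []).set c1 ((M.getD k []).getD c2 0) := by
    rw [List.getD_eq_getElem _ _ (by simpa using hk), List.getElem_set_self]
  simp only [h1, List.set_set]

theorem set_append_len {α : Type} (A B : List α) (x y : α) :
    (A ++ x :: B).set A.length y = A ++ y :: B := by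
  induction A with
  | nil => rfl
  | cons a A ih => simp [ih]

theorem colSwap_aux (c1 c2 : Nat) (M : List (List Int)) :
    ∀ k, k ≤ M.length →
      (List.range k).foldl (csStep c1 c2) M = (M.take k).map (sw c1 c2) ++ M.drop k := by
  intro k
  induction k with
  | zero => simp
  | succ k ih =>
    intro hk
    have hk' : k < M.length := by omega
    rw [List.range_succ, List.foldl_append, ih (by omega)]
    set A := (M.take k).map (sw c1 c2) with hA
    have hAlen : A.length = k := by simp [hA]; omega
    have hdrop : M.drop k = M[k] :: M.drop (k+1) := List.drop_eq_getElem_cons hk'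
    rw [hdrop]
    have hstep : csStep c1 c2 (A ++ M[k] :: M.drop (k+1)) k
        = (A ++ M[k] :: M.drop (k+1)).set k (sw c1 c2 ((A ++ M[k] :: M.drop (k+1)).getD k [])) := by
      apply csStep_eq
      simp [hAlen]
      omega
    have hget : (A ++ M[k] :: M.drop (k+1)).getD k [] = M[k] := by
      rw [List.getD_eq_getElem _ _ (by simp [hAlen]; omega)]
      rw [List.getElem_append_right (by omega)]
      simp [hAlen]
    have hset : (A ++ M[k] :: M.drop (k+1)).set k (sw c1 c2 M[k]) = A ++ sw c1 c2 M[k] :: M.drop (k+1) := by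
      have := set_append_len A (M.drop (k+1)) M[k] (sw c1 c2 M[k])
      rwa [hAlen] at this
    rw [List.foldl_cons, List.foldl_nil, hstep, hget, hset]
    have htake : M.take (k+1) = M.take k ++ [M[k]] := by
      rw [List.take_add_one]
      simp [List.getElem?_eq_getElem hk']
    rw [htake]
    simp only [List.map_append, List.map_cons, List.map_nil, ← hA, List.append_assoc,
      List.singleton_append]

theorem colSwap_eq (M : List (List Int)) (n c1 c2 : Nat) (h : n = M.length) :
    colSwap M n c1 c2 = M.map (sw c1 c2) := by
  unfold colSwap
  rw [h, colSwap_aux c1 c2 M M.length le_rfl]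
  simp

theorem rsStep_eq (r1 r2 : Nat) (M : List (List Int)) (k : Nat)
    (h1 : r1 < M.length) (h2 : r2 < M.length) :
    rsStep r1 r2 M k
      = (M.set r1 ((M.getD r1 []).set k ((M.getD r2 []).getD k 0))).set r2
          ((M.getD r2 []).set k ((M.getD r1 []).getD k 0)) := by
  unfold rsStep getI
  by_cases e : r1 = r2
  · subst e
    have hg : (M.set r1 ((M.getD r1 []).set k ((M.getD r1 []).getD k 0))).getD r1 []
        = (M.getD r1 []).set k ((M.getD r1 []).getD k 0) := by
      rw [List.getD_eq_getElem _ _ (by simpa using h1), List.getElem_set_self]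
    simp only [hg, List.set_set, List.set_set]
  · have hg : (M.set r1 ((M.getD r1 []).set k ((M.getD r2 []).getD k 0))).getD r2 []
        = M.getD r2 [] := by
      rw [List.getD_eq_getElem _ _ (by simpa using h2), List.getElem_set_ne (by omega)]
      exact (List.getD_eq_getElem _ _ h2).symm
    simp only [hg]

theorem mix_getD (r s : List Int) (k : Nat) (hk : k ≤ r.length) :
    (mix r s k).getD k 0 = s.getD k 0 := by
  unfold mix
  rw [List.getD_eq_getElem?_getD, List.getD_eq_getElem?_getD,
    List.getElem?_append_right (by simp)]
  have h1 : k - (r.take k).length = 0 := by simp; omega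
  rw [h1, List.getElem?_drop]
  simp

theorem mix_set (r s : List Int) (k : Nat) (hr : k < r.length) (hs : k < s.length) :
    (mix r s k).set k (r.getD k 0) = mix r s (k+1) := by
  unfold mix
  have hdrop : s.drop k = s[k] :: s.drop (k+1) := List.drop_eq_getElem_cons hs
  have htklen : (r.take k).length = k := by simp; omega
  rw [hdrop]
  have := set_append_len (r.take k) (s.drop (k+1)) s[k] (r.getD k 0)
  rw [htklen] at this
  rw [this]
  have htake : r.take (k+1) = r.take k ++ [r.getD k 0] := by
    rw [List.take_add_one]
    simp [List.getElem?_eq_getElem hr]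
  rw [htake]
  simp

theorem rowSwap_aux (M : List (List Int)) (n r1 r2 : Nat) (hne : r1 ≠ r2)
    (hlen : M.length = n) (h1 : r1 < n) (h2 : r2 < n)
    (hrow1 : (M.getD r1 []).length = n) (hrow2 : (M.getD r2 []).length = n) :
    ∀ k, k ≤ n →
      (List.range k).foldl (rsStep r1 r2) M
        = (M.set r1 (mix (M.getD r2 []) (M.getD r1 []) k)).set r2
            (mix (M.getD r1 []) (M.getD r2 []) k) := by
  intro k
  induction k with
  | zero =>
    intro _
    simp only [List.range_zero, List.foldl_nil, mix, List.take_zero, List.drop_zero,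
      List.nil_append]
    rw [List.getD_eq_getElem _ _ (by omega), List.getD_eq_getElem _ _ (by omega),
      List.set_getElem_self, List.set_getElem_self]
  | succ k ih =>
    intro hk
    have hk' : k < n := by omega
    rw [List.range_succ, List.foldl_append, ih (by omega), List.foldl_cons, List.foldl_nil]
    have hNlen : ((M.set r1 (mix (M.getD r2 []) (M.getD r1 []) k)).set r2
        (mix (M.getD r1 []) (M.getD r2 []) k)).length = M.length := by simp
    have hg1 : ((M.set r1 (mix (M.getD r2 []) (M.getD r1 []) k)).set r2
        (mix (M.getD r1 []) (M.getD r2 []) k)).getD r1 [] = mix (M.getD r2 []) (M.getD r1 []) k := by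
      rw [List.getD_eq_getElem _ _ (by rw [hNlen]; omega),
        List.getElem_set_ne (by omega), List.getElem_set_self]
    have hg2 : ((M.set r1 (mix (M.getD r2 []) (M.getD r1 []) k)).set r2
        (mix (M.getD r1 []) (M.getD r2 []) k)).getD r2 [] = mix (M.getD r1 []) (M.getD r2 []) k := by
      rw [List.getD_eq_getElem _ _ (by rw [hNlen]; omega), List.getElem_set_self]
    rw [rsStep_eq r1 r2 _ k (by rw [hNlen]; omega) (by rw [hNlen]; omega), hg1, hg2,
      mix_getD (M.getD r1 []) (M.getD r2 []) k (by omega),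
      mix_getD (M.getD r2 []) (M.getD r1 []) k (by omega),
      mix_set (M.getD r2 []) (M.getD r1 []) k (by omega) (by omega),
      mix_set (M.getD r1 []) (M.getD r2 []) k (by omega) (by omega)]
    rw [List.set_comm _ _ (show r2 ≠ r1 by omega), List.set_set, List.set_set]

theorem rowSwap_eq (M : List (List Int)) (n r1 r2 : Nat) (hne : r1 ≠ r2)
    (hlen : M.length = n) (h1 : r1 < n) (h2 : r2 < n)
    (hrow1 : (M.getD r1 []).length = n) (hrow2 : (M.getD r2 []).length = n) :
    rowSwap M n r1 r2 = (M.set r1 (M.getD r2 [])).set r2 (M.getD r1 []) := by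
  unfold rowSwap
  rw [rowSwap_aux M n r1 r2 hne hlen h1 h2 hrow1 hrow2 n le_rfl]
  have m1 : mix (M.getD r2 []) (M.getD r1 []) n = M.getD r2 [] := by
    unfold mix
    rw [List.take_of_length_le hrow2.le, List.drop_eq_nil_of_le hrow1.le, List.append_nil]
  have m2 : mix (M.getD r1 []) (M.getD r2 []) n = M.getD r1 [] := by
    unfold mix
    rw [List.take_of_length_le hrow1.le, List.drop_eq_nil_of_le hrow2.le, List.append_nil]
  rw [m1, m2]

theorem pG_swap (p : List Nat) (n c1 c2 i : Nat) (hp : p.length = n)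
    (h1 : c1 < n) (h2 : c2 < n) (hi : i < n) :
    pG ((p.set c1 (pG p c2)).set c2 (pG p c1)) i
      = pG p (if i = c2 then c1 else if i = c1 then c2 else i) := by
  subst hp
  exact swap_getD p 0 c1 c2 i h1 h2 hi

-- the key step: A's column swap followed by its line swap, applied to a gathered matrix,
-- is the gather of the matrix through the permutation with the two entries swapped
theorem swap_gather (TM : List (List Int)) (n : Nat) (p : List Nat) (c1 c2 : Nat)
    (hp : p.length = n) (h1 : c1 < n) (h2 : c2 < n) :
    rowSwap (colSwap (gather TM n p) n c1 c2) n c1 c2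
      = gather TM n ((p.set c1 (pG p c2)).set c2 (pG p c1)) := by
  have hGlen : (gather TM n p).length = n := gather_length TM n p
  have hGrow : ∀ i, i < n → ((gather TM n p).getD i []).length = n := by
    intro i hi
    rw [List.getD_eq_getElem _ _ (by omega)]
    simp [gather]
  by_cases e : c1 = c2
  · subst e
    have hcol : colSwap (gather TM n p) n c1 c1 = gather TM n p := by
      rw [colSwap_eq _ _ _ _ hGlen.symm]
      apply List.ext_getElem (by simp)
      intro i hi1 hi2
      have hi : i < n := by simpa [hGlen] using hi2
      rw [List.getElem_map]
      unfold sw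
      rw [List.set_set]
      have hrl : (gather TM n p)[i].length = n := by simp [gather]
      rw [List.getD_eq_getElem _ _ (by rw [hrl]; omega), List.set_getElem_self]
    rw [hcol]
    have hstep1 : ∀ k, k < n → rsStep c1 c1 (gather TM n p) k = gather TM n p := by
      intro k hk
      rw [rsStep_eq c1 c1 _ k (by omega) (by omega), List.set_set]
      have hrow : ((gather TM n p).getD c1 []).length = n := hGrow c1 h1
      rw [List.getD_eq_getElem ((gather TM n p).getD c1 []) 0 (by omega),
        List.set_getElem_self,
        List.getD_eq_getElem (gather TM n p) [] (by omega),
        List.set_getElem_self]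
    have hrowswap : ∀ (L : List Nat), (∀ k ∈ L, k < n) →
        L.foldl (rsStep c1 c1) (gather TM n p) = gather TM n p := by
      intro L
      induction L with
      | nil => intro _; simp
      | cons l L ih =>
        intro hmem
        rw [List.foldl_cons, hstep1 l (hmem l List.mem_cons_self)]
        exact ih (fun x hx => hmem x (List.mem_cons_of_mem l hx))
    have hrow : rowSwap (gather TM n p) n c1 c1 = gather TM n p :=
      hrowswap (List.range n) (fun k hk => List.mem_range.mp hk)
    rw [hrow]
    have hp' : (p.set c1 (pG p c1)).set c1 (pG p c1) = p := by
      rw [List.set_set]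
      unfold pG
      rw [List.getD_eq_getElem _ _ (by omega), List.set_getElem_self]
    rw [hp']
  · rw [colSwap_eq _ _ _ _ hGlen.symm]
    have hMcLen : ((gather TM n p).map (sw c1 c2)).length = n := by simp [hGlen]
    have hswlen : ∀ (r : List Int), (sw c1 c2 r).length = r.length := by
      intro r; simp [sw]
    have hMcGet : ∀ j, j < n → ((gather TM n p).map (sw c1 c2)).getD j []
        = sw c1 c2 ((List.range n).map (fun t => getI TM (pG p j) (pG p t))) := by
      intro j hj
      rw [List.getD_eq_getElem _ _ (by rw [hMcLen]; omega), List.getElem_map]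
      congr 1
      simp [gather]
    have hrowlen : ∀ j, j < n → (((gather TM n p).map (sw c1 c2)).getD j []).length = n := by
      intro j hj
      rw [hMcGet j hj, hswlen]
      simp
    rw [rowSwap_eq _ n c1 c2 e hMcLen h1 h2 (hrowlen c1 h1) (hrowlen c2 h2)]
    apply List.ext_getElem (by simp [hMcLen, gather_length])
    intro i hi1 hi2
    have hi : i < n := by simpa [hMcLen] using hi1
    have hsig : ∀ t, t < n → (if t = c2 then c1 else if t = c1 then c2 else t) < n := by
      intro t ht; split_ifs <;> omega
    -- convert to getD form and use swap_getD at the row level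
    have hrowswap : ((((gather TM n p).map (sw c1 c2)).set c1
          (((gather TM n p).map (sw c1 c2)).getD c2 [])).set c2
          (((gather TM n p).map (sw c1 c2)).getD c1 [])).getD i []
        = sw c1 c2 ((List.range n).map (fun t =>
            getI TM (pG p (if i = c2 then c1 else if i = c1 then c2 else i)) (pG p t))) := by
      rw [swap_getD _ [] c1 c2 i (by omega) (by omega) (by simp [hMcLen]; omega)]
      exact hMcGet _ (hsig i hi)
    rw [← List.getD_eq_getElem _ [] hi1, hrowswap]
    -- RHS row of the gathered permuted matrix
    have hR : (gather TM n ((p.set c1 (pG p c2)).set c2 (pG p c1)))[i]'(hi2)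
        = (List.range n).map (fun j => getI TM (pG ((p.set c1 (pG p c2)).set c2 (pG p c1)) i)
            (pG ((p.set c1 (pG p c2)).set c2 (pG p c1)) j)) := by
      simp [gather]
    rw [hR]
    apply List.ext_getElem (by simp [hswlen])
    intro j hj1 hj2
    have hj : j < n := by simpa using hj2
    -- entry j of sw row
    have hentry : (sw c1 c2 ((List.range n).map (fun t =>
          getI TM (pG p (if i = c2 then c1 else if i = c1 then c2 else i)) (pG p t)))).getD j 0
        = getI TM (pG p (if i = c2 then c1 else if i = c1 then c2 else i))
            (pG p (if j = c2 then c1 else if j = c1 then c2 else j)) := by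
      unfold sw
      rw [swap_getD _ 0 c1 c2 j (by simp; omega) (by simp; omega) (by simp; omega)]
      rw [List.getD_eq_getElem _ _ (by simp [hsig j hj]), List.getElem_map, List.getElem_range]
    rw [← List.getD_eq_getElem _ 0 hj1, hentry]
    simp only [List.getElem_map, List.getElem_range]
    rw [pG_swap p n c1 c2 i hp h1 h2 hi, pG_swap p n c1 c2 j hp h1 h2 hj]

theorem foldl_body_congr {α β : Type} (f g : α → β → α) :
    ∀ (L : List β) (s : α), (∀ x ∈ L, ∀ a, f a x = g a x) → L.foldl f s = L.foldl g s := by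
  intro L
  induction L with
  | nil => intro s _; rfl
  | cons x L ih =>
    intro s h
    rw [List.foldl_cons, List.foldl_cons, h x List.mem_cons_self s]
    exact ih _ (fun y hy a => h y (List.mem_cons_of_mem x hy) a)

theorem scanAux (g : Nat → Int) (a b : Int) :
    ∀ (L : List Nat) (s : Int × Int), (s.2 = -1 ∨ (a ≤ s.2 ∧ s.2 < b)) →
      (∀ c ∈ L, a ≤ (c : Int) ∧ (c : Int) < b) →
      ((L.foldl (fun (s : Int × Int) col => if g col > s.1 then (g col, (col : Int)) else s) s).2 = -1
        ∨ (a ≤ (L.foldl (fun (s : Int × Int) col => if g col > s.1 then (g col, (col : Int)) else s) s).2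
            ∧ (L.foldl (fun (s : Int × Int) col => if g col > s.1 then (g col, (col : Int)) else s) s).2 < b)) := by
  intro L
  induction L with
  | nil => intro s hs _; exact hs
  | cons x L ih =>
    intro s hs hmem
    rw [List.foldl_cons]
    apply ih
    · by_cases hx : g x > s.1
      · right
        simp only [if_pos hx]
        exact hmem x List.mem_cons_self
      · simp only [if_neg hx]
        exact hs
    · exact fun c hc => hmem c (List.mem_cons_of_mem x hc)

theorem scan_eq (TM : List (List Int)) (n : Nat) (p : List Nat) (line : Nat)
    (hline : line < n) :
    maxScanA (gather TM n p) line n = maxScanB TM p line n := by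
  unfold maxScanA maxScanB
  apply foldl_body_congr
  intro col hcol a
  have hc : line + 1 ≤ col ∧ col < n := by
    rw [List.mem_range'_1] at hcol
    omega
  rw [gather_entry TM n p line col hline hc.2]

theorem scan_pos (TM : List (List Int)) (p : List Nat) (line n : Nat) :
    (maxScanB TM p line n).2 = -1 ∨
      ((line : Int) + 1 ≤ (maxScanB TM p line n).2 ∧ (maxScanB TM p line n).2 < (n : Int)) := by
  unfold maxScanB
  apply scanAux
  · left; rfl
  · intro c hc
    rw [List.mem_range'_1] at hc
    omega

theorem step_eq (TM : List (List Int)) (n : Nat) (p : List Nat) (line : Nat)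
    (hp : p.length = n) (hline : line < n) :
    stepA n (gather TM n p) line = gather TM n (stepB TM n p line) := by
  unfold stepA stepB
  rw [scan_eq TM n p line hline]
  by_cases hs : (maxScanB TM p line n).2 > 0
  · simp only [if_pos hs]
    have hb := scan_pos TM p line n
    have hbb : (line : Int) + 1 ≤ (maxScanB TM p line n).2 ∧ (maxScanB TM p line n).2 < (n : Int) := by
      rcases hb with hb | hb
      · omega
      · exact hb
    have hc1 : line + 1 < n := by omega
    have hc2 : (maxScanB TM p line n).2.toNat < n := by omega
    exact swap_gather TM n p (line+1) (maxScanB TM p line n).2.toNat hp hc1 hc2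
  · simp only [if_neg hs]

theorem stepB_length (TM : List (List Int)) (n : Nat) (p : List Nat) (line : Nat) :
    (stepB TM n p line).length = p.length := by
  unfold stepB
  by_cases hs : (maxScanB TM p line n).2 > 0 <;> simp [hs]

theorem outer_eq (TM : List (List Int)) (n : Nat) :
    ∀ (L : List Nat), (∀ l ∈ L, l < n) → ∀ (p : List Nat), p.length = n →
      L.foldl (stepA n) (gather TM n p) = gather TM n (L.foldl (stepB TM n) p) := by
  intro L
  induction L with
  | nil => intro _ p _; simp
  | cons l L ih =>
    intro hmem p hp
    rw [List.foldl_cons, List.foldl_cons, step_eq TM n p l hp (hmem l List.mem_cons_self)]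
    exact ih (fun x hx => hmem x (List.mem_cons_of_mem l hx)) _
      (by rw [stepB_length]; exact hp)

theorem gather_id (TM : List (List Int)) (h : ∀ r ∈ TM, r.length = TM.length) :
    gather TM TM.length (List.range TM.length) = TM := by
  have hpg : ∀ t, t < TM.length → pG (List.range TM.length) t = t := by
    intro t ht
    unfold pG
    rw [List.getD_eq_getElem _ _ (by simpa using ht), List.getElem_range]
  apply List.ext_getElem (by simp [gather])
  intro i hi1 hi2
  have hi : i < TM.length := hi2
  have hrl : TM[i].length = TM.length := h TM[i] (List.getElem_mem hi)
  simp only [gather, List.getElem_map, List.getElem_range]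
  apply List.ext_getElem (by simp [hrl])
  intro j hj1 hj2
  have hj : j < TM.length := by rw [← hrl]; exact hj2
  simp only [List.getElem_map, List.getElem_range]
  rw [hpg i hi, hpg j hj]
  unfold getI
  rw [List.getD_eq_getElem _ _ hi, List.getD_eq_getElem _ _ hj2]

-- ===== VERDICT (by name: the statement is the Claim_ definition above) =====
theorem unscramble_tm_spec : Claim_equal_unscramble_tm := by
  intro TM _ hpre
  unfold Spec_unscramble_tm unscramble_tm unscramble_tm_alt
  have h := outer_eq TM TM.length (List.range TM.length) (fun l hl => List.mem_range.mp hl)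
    (List.range TM.length) (List.length_range)
  rw [gather_id TM hpre] at h
  exact h
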